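-- pv_equiv track=rewrite | github.com/JasonXie-Code/HDR_Viewer | misc/brightness_monitor.py | _pick_primary_als_sensor
-- ===== SOURCE A (Python) =====
-- def _pick_primary_als_sensor(sensors: list[dict[str, str]]) -> dict[str, str]:
--     """
--     主读数：优先 **融合 ALS**（名称含 Non-wakeup 且 **非** Raw/Strm 工厂流），与 misc/test.md 策略侧一致。
--     注意：**Raw Data Non-wakeup** 名称里也带 `non-wakeup`，若与融合路混在同一列表里按序先匹配，会误把 Raw 首通道当成「主传感器」。
--     """
--     if not sensors:
--         return {}
--
--     def has_lux(s: dict[str, str]) -> bool: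
--         return bool((s.get("lux") or "").strip())
--
--     def is_raw_or_strm(name: str) -> bool:
--         n = name.lower()
--         if "strm" in n:
--             return True
--         return "raw data" in n
--
--     non_wakeup = [s for s in sensors if "non-wakeup" in s["name"].lower()]
--     fusion_non_wakeup = [s for s in non_wakeup if not is_raw_or_strm(s["name"])]
--     tcs3720 = [s for s in sensors if "TCS3720" in s["name"] or "3720" in s["name"]]
--
--     for s in fusion_non_wakeup:
--         if has_lux(s):
--             return s
--     for s in non_wakeup:
--         if has_lux(s):
--             return s
--     for s in tcs3720:
--         if has_lux(s):
--             return s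
--     for s in sensors:
--         if has_lux(s):
--             return s
--     if non_wakeup:
--         return non_wakeup[0]
--     if tcs3720:
--         return tcs3720[0]
--     return sensors[0]
-- ===== SOURCE B (Python) =====
-- def _pick_primary_als_sensor(sensors: list[dict[str, str]]) -> dict[str, str]:
--     """Single scoring pass: each sensor gets a priority tier, then one argmin scan
--     (stable: first sensor of the smallest tier wins)."""
--     if not sensors:
--         return {}
--
--     def tier(s: dict[str, str]) -> int:
--         name = s["name"]
--         n = name.lower()
--         nw = "non-wakeup" in n
--         raw = "strm" in n or "raw data" in n
--         lux = bool((s.get("lux") or "").strip())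
--         tcs = "TCS3720" in name or "3720" in name
--         if lux and nw and not raw:
--             return 1
--         if lux and nw:
--             return 2
--         if lux and tcs:
--             return 3
--         if lux:
--             return 4
--         if nw:
--             return 5
--         if tcs:
--             return 6
--         return 7
--
--     best_t, best = tier(sensors[0]), sensors[0]
--     for s in sensors[1:]:
--         t = tier(s)
--         if t < best_t:
--             best_t, best = t, s
--     return best
-- ===== Notes on version B (the rewrite author's own statement) =====
-- stated objective: alternative
-- what changed: A's four sequential lux-scans over three pre-filtered lists plus three positional fallbacks are replaced by computing one priority tier (1-7) per sensor and a single stable argmin scan over (tier, position).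
import Mathlib
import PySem

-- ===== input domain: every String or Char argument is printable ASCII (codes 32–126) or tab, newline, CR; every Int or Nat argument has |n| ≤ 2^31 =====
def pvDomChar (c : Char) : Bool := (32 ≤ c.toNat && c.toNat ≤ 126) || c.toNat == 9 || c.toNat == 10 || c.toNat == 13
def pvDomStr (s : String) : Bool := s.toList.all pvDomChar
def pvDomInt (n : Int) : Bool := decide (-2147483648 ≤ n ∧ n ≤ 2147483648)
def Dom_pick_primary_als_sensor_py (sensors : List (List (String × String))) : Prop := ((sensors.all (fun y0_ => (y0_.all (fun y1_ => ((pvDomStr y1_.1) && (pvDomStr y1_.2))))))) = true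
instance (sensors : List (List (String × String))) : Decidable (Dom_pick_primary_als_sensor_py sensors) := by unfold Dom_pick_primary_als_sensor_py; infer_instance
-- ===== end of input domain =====

-- B replaces A's four sequential lux-scans over three filtered lists plus three positional
-- fallbacks by one priority tier per sensor and a single stable argmin scan (objective: simpler,
-- one pass; no speed claim). Equivalence is about the return value; neither version mutates its input.

-- shared sensor-field helpers (the same field accesses both Python versions perform)
def pvLookup (s : List (String × String)) (k : String) : Option String :=
  (s.find? (fun p => p.1 == k)).map (·.2)

def pvName (s : List (String × String)) : String := (pvLookup s "name").getD ""

def pvHasLux (s : List (String × String)) : Bool :=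
  !(PySem.Str.strip ((pvLookup s "lux").getD "") == "")

def pvIsRawOrStrm (name : String) : Bool :=
  if PySem.Str.isIn "strm" (PySem.Str.lower name) then true
  else PySem.Str.isIn "raw data" (PySem.Str.lower name)

def pvIsNonWakeup (s : List (String × String)) : Bool :=
  PySem.Str.isIn "non-wakeup" (PySem.Str.lower (pvName s))

def pvIsTcs (s : List (String × String)) : Bool :=
  PySem.Str.isIn "TCS3720" (pvName s) || PySem.Str.isIn "3720" (pvName s)

-- ===== PORT A =====
def pick_primary_als_sensor_py (sensors : List (List (String × String))) : List (String × String) :=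
  match sensors with
  | [] => []
  | s0 :: _ =>
    let non_wakeup := sensors.filter pvIsNonWakeup
    let fusion_non_wakeup := non_wakeup.filter (fun s => !pvIsRawOrStrm (pvName s))
    let tcs3720 := sensors.filter pvIsTcs
    match fusion_non_wakeup.find? pvHasLux with
    | some s => s
    | none =>
      match non_wakeup.find? pvHasLux with
      | some s => s
      | none =>
        match tcs3720.find? pvHasLux with
        | some s => s
        | none =>
          match sensors.find? pvHasLux with
          | some s => s
          | none =>
            match non_wakeup.head? with
            | some s => s
            | none =>
              match tcs3720.head? with
              | some s => s
              | none => s0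

-- ===== PORT B =====
def pvTier (s : List (String × String)) : Nat :=
  if pvHasLux s && pvIsNonWakeup s && !pvIsRawOrStrm (pvName s) then 1
  else if pvHasLux s && pvIsNonWakeup s then 2
  else if pvHasLux s && pvIsTcs s then 3
  else if pvHasLux s then 4
  else if pvIsNonWakeup s then 5
  else if pvIsTcs s then 6
  else 7

def pick_primary_als_sensor_py_alt (sensors : List (List (String × String))) : List (String × String) :=
  match sensors with
  | [] => []
  | s0 :: rest =>
    (rest.foldl (fun best s => if pvTier s < best.1 then (pvTier s, s) else best)
      (pvTier s0, s0)).2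

-- ===== PRECONDITION & SPEC =====
-- Pre_ excludes exactly the inputs where some sensor dict has no "name" key: there the
-- Python A (and the Python B alike) raises KeyError instead of returning.
def Pre_pick_primary_als_sensor_py (sensors : List (List (String × String))) : Prop :=
  (sensors.all (fun s => s.any (fun p => p.1 == "name"))) = true
instance (sensors : List (List (String × String))) : Decidable (Pre_pick_primary_als_sensor_py sensors) := by unfold Pre_pick_primary_als_sensor_py; infer_instance

def pvWitness_pick_primary_als_sensor_py : (List (List (String × String))) :=
  [[("name", "Raw Data Non-wakeup"), ("lux", "7")], [("name", "ALS Non-wakeup"), ("lux", "3")]]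

def Spec_pick_primary_als_sensor_py (sensors : List (List (String × String))) (out : List (String × String)) : Prop := out = pick_primary_als_sensor_py_alt sensors
instance (sensors : List (List (String × String))) (out : List (String × String)) : Decidable (Spec_pick_primary_als_sensor_py sensors out) := by unfold Spec_pick_primary_als_sensor_py; infer_instance

-- ===== CLAIM (what is proved, stated in full; the proofs are below) =====
def Claim_equal_pick_primary_als_sensor_py : Prop := ∀ (sensors : List (List (String × String))), Dom_pick_primary_als_sensor_py sensors → Pre_pick_primary_als_sensor_py sensors → Spec_pick_primary_als_sensor_py sensors (pick_primary_als_sensor_py sensors)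

-- ===== LEMMAS AND PROOFS =====

-- bounds of the tier table
theorem pvTier_le7 (s : List (String × String)) : pvTier s ≤ 7 := by
  unfold pvTier; split_ifs <;> omega

theorem pvTier_ge1 (s : List (String × String)) : 1 ≤ pvTier s := by
  unfold pvTier; split_ifs <;> omega

-- each of A's seven stage predicates against the tier table
theorem pvT1a (s : List (String × String)) :
    (pvIsNonWakeup s && (!pvIsRawOrStrm (pvName s) && pvHasLux s)) = true → pvTier s ≤ 1 := by
  intro h; unfold pvTier; split_ifs <;> simp_all

theorem pvT1b (s : List (String × String)) :
    pvTier s = 1 → (pvIsNonWakeup s && (!pvIsRawOrStrm (pvName s) && pvHasLux s)) = true := by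
  intro h; unfold pvTier at h; split_ifs at h <;> simp_all

theorem pvT2a (s : List (String × String)) :
    (pvIsNonWakeup s && pvHasLux s) = true → pvTier s ≤ 2 := by
  intro h; unfold pvTier; split_ifs <;> simp_all

theorem pvT2b (s : List (String × String)) :
    pvTier s = 2 → (pvIsNonWakeup s && pvHasLux s) = true := by
  intro h; unfold pvTier at h; split_ifs at h <;> simp_all

theorem pvT3a (s : List (String × String)) :
    (pvIsTcs s && pvHasLux s) = true → pvTier s ≤ 3 := by
  intro h; unfold pvTier; split_ifs <;> simp_all

theorem pvT3b (s : List (String × String)) :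
    pvTier s = 3 → (pvIsTcs s && pvHasLux s) = true := by
  intro h; unfold pvTier at h; split_ifs at h <;> simp_all

theorem pvT4a (s : List (String × String)) : pvHasLux s = true → pvTier s ≤ 4 := by
  intro h; unfold pvTier; split_ifs <;> simp_all

theorem pvT4b (s : List (String × String)) : pvTier s = 4 → pvHasLux s = true := by
  intro h; unfold pvTier at h; split_ifs at h <;> simp_all

theorem pvT5a (s : List (String × String)) : pvIsNonWakeup s = true → pvTier s ≤ 5 := by
  intro h; unfold pvTier; split_ifs <;> simp_all

theorem pvT5b (s : List (String × String)) : pvTier s = 5 → pvIsNonWakeup s = true := by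
  intro h; unfold pvTier at h; split_ifs at h <;> simp_all

theorem pvT6a (s : List (String × String)) : pvIsTcs s = true → pvTier s ≤ 6 := by
  intro h; unfold pvTier; split_ifs <;> simp_all

theorem pvT6b (s : List (String × String)) : pvTier s = 6 → pvIsTcs s = true := by
  intro h; unfold pvTier at h; split_ifs at h <;> simp_all

-- the minimum tier of a list (8 = above every real tier)
def pvMinTier (l : List (List (String × String))) : Nat :=
  l.foldr (fun s a => min (pvTier s) a) 8

theorem pvMinTier_nil : pvMinTier [] = 8 := rfl

theorem pvMinTier_cons (s : List (String × String)) (l : List (List (String × String))) :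
    pvMinTier (s :: l) = min (pvTier s) (pvMinTier l) := rfl

theorem pvMinTier_le_of_mem {s : List (String × String)} :
    ∀ {l : List (List (String × String))}, s ∈ l → pvMinTier l ≤ pvTier s := by
  intro l
  induction l with
  | nil => intro h; cases h
  | cons a t ih =>
    intro h
    rw [pvMinTier_cons]
    rcases List.mem_cons.mp h with h | h
    · subst h; omega
    · have := ih h; omega

theorem pvMinTier_attained :
    ∀ (l : List (List (String × String))), pvMinTier l = 8 ∨ ∃ s ∈ l, pvTier s = pvMinTier l := by
  intro l
  induction l with
  | nil => exact Or.inl rfl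
  | cons a t ih =>
    right
    rw [pvMinTier_cons]
    rcases ih with h8 | ⟨w, hw, hwt⟩
    · refine ⟨a, List.mem_cons_self .., ?_⟩
      have := pvTier_le7 a
      omega
    · by_cases hat : pvTier a ≤ pvTier w
      · refine ⟨a, List.mem_cons_self .., ?_⟩
        have := pvMinTier_le_of_mem hw
        omega
      · exact ⟨w, List.mem_cons_of_mem _ hw, by omega⟩

-- find? only depends on the predicate's values on the list
theorem pvFind?_congr {α : Type} {p q : α → Bool} :
    ∀ (l : List α), (∀ x ∈ l, p x = q x) → l.find? p = l.find? q := by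
  intro l
  induction l with
  | nil => intro _; rfl
  | cons a t ih =>
    intro h
    have ha := h a (List.mem_cons_self ..)
    cases hq : q a with
    | true => rw [List.find?_cons_of_pos (by rw [ha, hq]), List.find?_cons_of_pos hq]
    | false =>
      rw [List.find?_cons_of_neg (by rw [ha, hq]; simp), List.find?_cons_of_neg (by rw [hq]; simp),
        ih (fun x hx => h x (List.mem_cons_of_mem _ hx))]

-- a stage whose predicate forces a tier below the minimum finds nothing
theorem pvStageNone {m c : Nat} {l : List (List (String × String))} {p : List (String × String) → Bool}
    (hc : ∀ s, p s = true → pvTier s ≤ c) (hm : ∀ s ∈ l, m ≤ pvTier s) (hcm : c < m) :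
    l.find? p = none := by
  rw [List.find?_eq_none]
  intro x hx hp
  have := hc x hp
  have := hm x hx
  omega

-- on a list whose tiers are all ≥ m, the m-th stage predicate is 'tier = m'
theorem pvStageEq (m : Nat) {l : List (List (String × String))} {p : List (String × String) → Bool}
    (hup : ∀ s, p s = true → pvTier s ≤ m) (hdn : ∀ s, pvTier s = m → p s = true)
    (hm : ∀ s ∈ l, m ≤ pvTier s) :
    l.find? p = l.find? (fun s => pvTier s == m) := by
  apply pvFind?_congr
  intro x hx
  have h := hm x hx
  cases hp : p x with
  | true =>
    have := hup x hp
    have : pvTier x = m := by omega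
    simp [this]
  | false =>
    have hne : pvTier x ≠ m := by
      intro he
      rw [hdn x he] at hp
      cases hp
    simp [hne]

theorem pvFindAttained (l : List (List (String × String))) (m : Nat)
    (hex : ∃ s ∈ l, pvTier s = m) :
    ∃ v, l.find? (fun s => pvTier s == m) = some v := by
  have h : (l.find? (fun s => pvTier s == m)).isSome = true := by
    rw [List.find?_isSome]
    obtain ⟨s, hs, ht⟩ := hex
    exact ⟨s, hs, by simp [ht]⟩
  exact Option.isSome_iff_exists.mp h

-- characterisation of A's cascade: it returns the first sensor of minimal tier
theorem pvA_char (s0 : List (String × String)) (rest : List (List (String × String)))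
    (m : Nat) (h1 : 1 ≤ m) (h7 : m ≤ 7)
    (hle : ∀ s ∈ (s0 :: rest), m ≤ pvTier s) (hex : ∃ s ∈ (s0 :: rest), pvTier s = m) :
    pick_primary_als_sensor_py (s0 :: rest) =
      ((s0 :: rest).find? (fun s => pvTier s == m)).getD [] := by
  have e1 : (((s0 :: rest).filter pvIsNonWakeup).filter
      (fun s => !pvIsRawOrStrm (pvName s))).find? pvHasLux =
      (s0 :: rest).find? (fun s => pvIsNonWakeup s && (!pvIsRawOrStrm (pvName s) && pvHasLux s)) := by
    rw [List.find?_filter, List.find?_filter]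
    exact pvFind?_congr _ (fun x _ => by
      cases pvIsNonWakeup x <;> cases pvIsRawOrStrm (pvName x) <;> cases pvHasLux x <;> simp)
  have e2 : ((s0 :: rest).filter pvIsNonWakeup).find? pvHasLux =
      (s0 :: rest).find? (fun s => pvIsNonWakeup s && pvHasLux s) := by
    rw [List.find?_filter]
    exact pvFind?_congr _ (fun x _ => by cases pvIsNonWakeup x <;> cases pvHasLux x <;> simp)
  have e3 : ((s0 :: rest).filter pvIsTcs).find? pvHasLux =
      (s0 :: rest).find? (fun s => pvIsTcs s && pvHasLux s) := by
    rw [List.find?_filter]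
    exact pvFind?_congr _ (fun x _ => by cases pvIsTcs x <;> cases pvHasLux x <;> simp)
  have e5 : ((s0 :: rest).filter pvIsNonWakeup).head? = (s0 :: rest).find? pvIsNonWakeup :=
    List.head?_filter
  have e6 : ((s0 :: rest).filter pvIsTcs).head? = (s0 :: rest).find? pvIsTcs :=
    List.head?_filter
  simp only [pick_primary_als_sensor_py]
  rw [e1, e2, e3, e5, e6]
  interval_cases m
  · -- m = 1
    obtain ⟨v, hv⟩ := pvFindAttained _ 1 hex
    simp only [pvStageEq 1 pvT1a (fun s h => pvT1b s h) hle, hv, Option.getD_some]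
  · -- m = 2
    obtain ⟨v, hv⟩ := pvFindAttained _ 2 hex
    simp only [pvStageNone pvT1a hle (by omega), pvStageEq 2 pvT2a (fun s h => pvT2b s h) hle, hv, Option.getD_some]
  · -- m = 3
    obtain ⟨v, hv⟩ := pvFindAttained _ 3 hex
    simp only [pvStageNone pvT1a hle (by omega), pvStageNone pvT2a hle (by omega), pvStageEq 3 pvT3a (fun s h => pvT3b s h) hle, hv, Option.getD_some]
  · -- m = 4
    obtain ⟨v, hv⟩ := pvFindAttained _ 4 hex
    simp only [pvStageNone pvT1a hle (by omega), pvStageNone pvT2a hle (by omega), pvStageNone pvT3a hle (by omega), pvStageEq 4 pvT4a (fun s h => pvT4b s h) hle, hv, Option.getD_some]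
  · -- m = 5
    obtain ⟨v, hv⟩ := pvFindAttained _ 5 hex
    simp only [pvStageNone pvT1a hle (by omega), pvStageNone pvT2a hle (by omega), pvStageNone pvT3a hle (by omega), pvStageNone pvT4a hle (by omega), pvStageEq 5 pvT5a (fun s h => pvT5b s h) hle, hv, Option.getD_some]
  · -- m = 6
    obtain ⟨v, hv⟩ := pvFindAttained _ 6 hex
    simp only [pvStageNone pvT1a hle (by omega), pvStageNone pvT2a hle (by omega), pvStageNone pvT3a hle (by omega), pvStageNone pvT4a hle (by omega), pvStageNone pvT5a hle (by omega), pvStageEq 6 pvT6a (fun s h => pvT6b s h) hle, hv, Option.getD_some]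
  · -- m = 7
    have h0 : pvTier s0 = 7 := by
      have := hle s0 (List.mem_cons_self ..)
      have := pvTier_le7 s0
      omega
    simp only [pvStageNone pvT1a hle (by omega), pvStageNone pvT2a hle (by omega),
      pvStageNone pvT3a hle (by omega), pvStageNone pvT4a hle (by omega),
      pvStageNone pvT5a hle (by omega), pvStageNone pvT6a hle (by omega)]
    rw [List.find?_cons_of_pos (by simp [h0])]; rfl

-- characterisation of B's argmin scan
theorem pvScan_eq :
    ∀ (l : List (List (String × String))) (b : Nat × List (String × String)), b.1 ≤ 8 →
    l.foldl (fun best s => if pvTier s < best.1 then (pvTier s, s) else best) b =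
      if pvMinTier l < b.1 then
        (pvMinTier l, (l.find? (fun s => pvTier s == pvMinTier l)).getD b.2)
      else b := by
  intro l
  induction l with
  | nil =>
    intro b hb
    rw [List.foldl_nil, pvMinTier_nil, if_neg (by omega)]
  | cons a t ih =>
    intro b hb
    rw [List.foldl_cons, pvMinTier_cons]
    by_cases h : pvTier a < b.1
    · rw [if_pos h, ih (pvTier a, a) (by have := pvTier_le7 a; omega)]
      by_cases h2 : pvMinTier t < pvTier a
      · rw [if_pos h2, if_pos (by omega), Nat.min_eq_right (by omega)]
        rw [List.find?_cons_of_neg (by simp; omega)]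
        obtain ⟨v, hv⟩ : ∃ v, t.find? (fun s => pvTier s == pvMinTier t) = some v := by
          rcases pvMinTier_attained t with h8 | hex
          · have := pvTier_le7 a; omega
          · exact pvFindAttained t _ (by obtain ⟨w, hw, hwt⟩ := hex; exact ⟨w, hw, hwt⟩)
        rw [hv]; rfl
      · rw [if_neg h2, Nat.min_eq_left (by omega), if_pos h,
          List.find?_cons_of_pos (by simp)]; rfl
    · rw [if_neg h, ih b hb]
      by_cases h2 : pvMinTier t < b.1
      · rw [if_pos h2, Nat.min_eq_right (by omega), if_pos h2,
          List.find?_cons_of_neg (by simp; omega)]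
      · rw [if_neg h2, if_neg (by omega)]

theorem pvB_char (s0 : List (String × String)) (rest : List (List (String × String))) :
    pick_primary_als_sensor_py_alt (s0 :: rest) =
      ((s0 :: rest).find? (fun s => pvTier s == pvMinTier (s0 :: rest))).getD [] := by
  show (rest.foldl (fun best s => if pvTier s < best.1 then (pvTier s, s) else best)
      (pvTier s0, s0)).2 = _
  rw [pvScan_eq rest (pvTier s0, s0) (by have := pvTier_le7 s0; omega), pvMinTier_cons]
  by_cases h : pvMinTier rest < pvTier s0
  · rw [if_pos h, Nat.min_eq_right (by omega),
      List.find?_cons_of_neg (by simp; omega)]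
    obtain ⟨v, hv⟩ : ∃ v, rest.find? (fun s => pvTier s == pvMinTier rest) = some v := by
      rcases pvMinTier_attained rest with h8 | hex
      · have := pvTier_le7 s0; omega
      · exact pvFindAttained rest _ (by obtain ⟨w, hw, hwt⟩ := hex; exact ⟨w, hw, hwt⟩)
    rw [hv]; rfl
  · rw [if_neg h, Nat.min_eq_left (by omega), List.find?_cons_of_pos (by simp)]; rfl

-- ===== VERDICT (by name: the statement is the Claim_ definition above) =====
theorem pick_primary_als_sensor_py_spec : Claim_equal_pick_primary_als_sensor_py := by
  intro sensors _ _
  unfold Spec_pick_primary_als_sensor_py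
  cases sensors with
  | nil => rfl
  | cons s0 rest =>
    have hle : ∀ s ∈ (s0 :: rest), pvMinTier (s0 :: rest) ≤ pvTier s :=
      fun s hs => pvMinTier_le_of_mem hs
    have h7 : pvMinTier (s0 :: rest) ≤ 7 := by
      have := pvMinTier_le_of_mem (show s0 ∈ s0 :: rest from List.mem_cons_self ..)
      have := pvTier_le7 s0
      omega
    have hex : ∃ s ∈ (s0 :: rest), pvTier s = pvMinTier (s0 :: rest) := by
      rcases pvMinTier_attained (s0 :: rest) with h8 | hex
      · omega
      · exact hex
    have h1 : 1 ≤ pvMinTier (s0 :: rest) := by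
      obtain ⟨s, _, ht⟩ := hex
      have := pvTier_ge1 s
      omega
    rw [pvA_char s0 rest (pvMinTier (s0 :: rest)) h1 h7 hle hex, pvB_char]
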